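-- pv_equiv track=rewrite | github.com/SkySingh04/oaas | scripts/exhaustive_flag_optimizer.py | _generate_flag_combinations
-- ===== SOURCE A (Python) =====
-- import itertools
-- from typing import Dict, List, Optional, Sequence, Set, Tuple
--
-- def _generate_flag_combinations(
--     flags: Sequence[str],
--     min_size: int = 1,
--     max_size: Optional[int] = None,
--     exclude_conflicts: bool = True,
-- ) -> List[List[str]]:
--     """
--     Generate all possible flag combinations.
--
--     Args:
--         flags: List of flags to combine
--         min_size: Minimum number of flags in a combination
--         max_size: Maximum number of flags in a combination (None = all)
--         exclude_conflicts: Whether to exclude conflicting flags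
--
--     Returns:
--         List of flag combinations
--     """
--     if max_size is None:
--         max_size = len(flags)
--
--     # Define conflicting flag patterns
--     conflicts = [
--         # Optimization levels conflict with each other
--         {"-O0", "-O1", "-O2", "-O3", "-Os", "-Oz", "-Ofast", "-Og"},
--         # LTO types conflict
--         {"-flto", "-flto=thin", "-flto=full"},
--         # Inlining conflicts
--         {"-finline-functions", "-fno-inline", "-fno-inline-functions"},
--         {"-finline-limit=1000", "-finline-limit=10000", "-finline-limit=999999"},
--         # Frame pointer conflicts
--         {"-fomit-frame-pointer", "-fno-omit-frame-pointer"},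
--         # Loop unrolling conflicts
--         {"-funroll-loops", "-funroll-all-loops", "-fno-unroll-loops"},
--         # Vectorization conflicts
--         {"-fvectorize", "-fno-vectorize"},
--         {"-fslp-vectorize", "-fno-slp-vectorize"},
--         # Math optimization conflicts
--         {"-ffp-contract=fast", "-ffp-contract=off"},
--         # Control flow protection conflicts
--         {"-fcf-protection=none", "-fcf-protection=branch", "-fcf-protection=return", "-fcf-protection=full"},
--         # Register allocator conflicts
--         {"-mllvm -regalloc=greedy", "-mllvm -regalloc=basic", "-mllvm -regalloc=fast", "-mllvm -regalloc=pbqp"},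
--         # Constant merging conflicts
--         {"-fmerge-constants", "-fmerge-all-constants", "-fno-merge-constants"},
--         # Aliasing conflicts
--         {"-fstrict-aliasing", "-fno-strict-aliasing"},
--         # Sibling call conflicts
--         {"-foptimize-sibling-calls", "-fno-optimize-sibling-calls"},
--     ]
--
--     def has_conflict(combination: Tuple[str, ...]) -> bool:
--         """Check if a combination has conflicting flags."""
--         if not exclude_conflicts:
--             return False
--
--         combo_set = set(combination)
--         for conflict_group in conflicts:
--             if len(combo_set & conflict_group) > 1:
--                 return True
--         return False
--
--     all_combinations: List[List[str]] = []
--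
--     for size in range(min_size, max_size + 1):
--         for combo in itertools.combinations(flags, size):
--             if not has_conflict(combo):
--                 all_combinations.append(list(combo))
--
--     return all_combinations
-- ===== SOURCE B (Python) =====
-- from typing import List, Optional, Sequence
--
--
-- _CONFLICT_GROUPS = [
--     ["-O0", "-O1", "-O2", "-O3", "-Os", "-Oz", "-Ofast", "-Og"],
--     ["-flto", "-flto=thin", "-flto=full"],
--     ["-finline-functions", "-fno-inline", "-fno-inline-functions"],
--     ["-finline-limit=1000", "-finline-limit=10000", "-finline-limit=999999"],
--     ["-fomit-frame-pointer", "-fno-omit-frame-pointer"],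
--     ["-funroll-loops", "-funroll-all-loops", "-fno-unroll-loops"],
--     ["-fvectorize", "-fno-vectorize"],
--     ["-fslp-vectorize", "-fno-slp-vectorize"],
--     ["-ffp-contract=fast", "-ffp-contract=off"],
--     ["-fcf-protection=none", "-fcf-protection=branch", "-fcf-protection=return", "-fcf-protection=full"],
--     ["-mllvm -regalloc=greedy", "-mllvm -regalloc=basic", "-mllvm -regalloc=fast", "-mllvm -regalloc=pbqp"],
--     ["-fmerge-constants", "-fmerge-all-constants", "-fno-merge-constants"],
--     ["-fstrict-aliasing", "-fno-strict-aliasing"],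
--     ["-foptimize-sibling-calls", "-fno-optimize-sibling-calls"],
-- ]
--
--
-- def _generate_flag_combinations(
--     flags: Sequence[str],
--     min_size: int = 1,
--     max_size: Optional[int] = None,
--     exclude_conflicts: bool = True,
-- ) -> List[List[str]]:
--     """Generate all flag combinations whose sizes lie in [min_size, max_size],
--     pruning conflicts while building instead of filtering afterwards.
--
--     A combination is valid when every conflict group contributes at most one
--     distinct flag to it.  Combinations are produced by one recursive
--     backtracking DFS over flag positions and bucketed by size (results are
--     grouped by size, lexicographic by position within a size).
--     """
--     if max_size is None:
--         max_size = len(flags)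
--     flags = list(flags)
--     n = len(flags)
--     # pair every flag with its conflict group (groups are pairwise disjoint)
--     items = [(f, next((g for g in _CONFLICT_GROUPS if f in g), None)) for f in flags]
--     lo = max(min_size, 0)
--     hi = min(max_size, n)
--     buckets: List[List[List[str]]] = [[] for _ in range(hi + 1)]
--
--     def ok(f: str, grp: Optional[List[str]], chosen: List[str]) -> bool:
--         # after adding f, its conflict group must still contribute at most
--         # one distinct flag to the combination
--         if not exclude_conflicts or grp is None:
--             return True
--         return len({x for x in chosen if x in grp} | {f}) <= 1
--
--     def dfs(i: int, chosen: List[str]) -> None: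
--         # scan items[i:] for the next flag to take; emit each new combination
--         # at its take step, then explore deeper before moving on
--         if len(chosen) == hi:
--             return
--         for j in range(i, n):
--             if n - j < lo - len(chosen):
--                 break  # too few flags left to ever reach size lo
--             f, grp = items[j]
--             if ok(f, grp, chosen):
--                 c2 = chosen + [f]
--                 buckets[len(c2)].append(c2)
--                 dfs(j + 1, c2)
--
--     if lo <= hi:
--         buckets[0].append([])
--         dfs(0, [])
--     result: List[List[str]] = []
--     for k in range(lo, hi + 1):
--         result += buckets[k]
--     return result
-- ===== Notes on version B (the rewrite author's own statement) =====
-- stated objective: alternative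
-- what changed: B replaces A's generate-then-filter (itertools.combinations for every size, then a set-intersection conflict filter per combination) by one recursive backtracking DFS over per-flag precomputed conflict groups that prunes a branch as soon as a conflict group would contribute more than one distinct flag (or too few flags remain to reach min_size), bucketing emissions by size to reproduce A's size-then-lexicographic order.
import Mathlib
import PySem

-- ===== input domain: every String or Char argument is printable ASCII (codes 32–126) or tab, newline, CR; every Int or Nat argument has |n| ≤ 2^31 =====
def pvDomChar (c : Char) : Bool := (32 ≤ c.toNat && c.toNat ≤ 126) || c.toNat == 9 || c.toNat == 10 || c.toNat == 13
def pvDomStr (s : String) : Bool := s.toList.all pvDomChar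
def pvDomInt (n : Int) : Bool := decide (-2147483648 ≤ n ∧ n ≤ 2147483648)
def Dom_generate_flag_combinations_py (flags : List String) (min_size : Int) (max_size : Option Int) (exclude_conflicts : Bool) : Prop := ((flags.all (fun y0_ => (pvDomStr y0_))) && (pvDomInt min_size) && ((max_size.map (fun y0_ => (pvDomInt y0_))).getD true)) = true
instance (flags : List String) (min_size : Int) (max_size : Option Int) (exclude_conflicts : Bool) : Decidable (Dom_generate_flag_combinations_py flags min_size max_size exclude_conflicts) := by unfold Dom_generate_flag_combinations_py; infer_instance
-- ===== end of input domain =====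

-- B generates all sizes in one recursive backtracking DFS that prunes a branch as soon
-- as a conflict group would contribute more than one distinct flag (and when
-- too few flags remain to reach min_size), bucketing emissions by size,
-- instead of A's per-size itertools-combinations-then-filter; return values
-- agree on Pre_ (A raises ValueError when min_size is negative and the size
-- range is nonempty).

-- ===== PORT A =====
-- the conflict groups, Python set literals → PySem.Set
def pvConflicts : List (PySem.Set String) :=
  [PySem.Set.ofList ["-O0", "-O1", "-O2", "-O3", "-Os", "-Oz", "-Ofast", "-Og"],
   PySem.Set.ofList ["-flto", "-flto=thin", "-flto=full"],
   PySem.Set.ofList ["-finline-functions", "-fno-inline", "-fno-inline-functions"],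
   PySem.Set.ofList ["-finline-limit=1000", "-finline-limit=10000", "-finline-limit=999999"],
   PySem.Set.ofList ["-fomit-frame-pointer", "-fno-omit-frame-pointer"],
   PySem.Set.ofList ["-funroll-loops", "-funroll-all-loops", "-fno-unroll-loops"],
   PySem.Set.ofList ["-fvectorize", "-fno-vectorize"],
   PySem.Set.ofList ["-fslp-vectorize", "-fno-slp-vectorize"],
   PySem.Set.ofList ["-ffp-contract=fast", "-ffp-contract=off"],
   PySem.Set.ofList ["-fcf-protection=none", "-fcf-protection=branch", "-fcf-protection=return", "-fcf-protection=full"],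
   PySem.Set.ofList ["-mllvm -regalloc=greedy", "-mllvm -regalloc=basic", "-mllvm -regalloc=fast", "-mllvm -regalloc=pbqp"],
   PySem.Set.ofList ["-fmerge-constants", "-fmerge-all-constants", "-fno-merge-constants"],
   PySem.Set.ofList ["-fstrict-aliasing", "-fno-strict-aliasing"],
   PySem.Set.ofList ["-foptimize-sibling-calls", "-fno-optimize-sibling-calls"]]

-- has_conflict: combo_set = set(combination); any group with len(combo_set & group) > 1
def pvHasConflict (exclude_conflicts : Bool) (combo : List String) : Bool :=
  if !exclude_conflicts then false
  else
    let comboSet : PySem.Set String := PySem.Set.ofList combo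
    pvConflicts.any (fun g => 1 < (PySem.Set.inter comboSet g).length)

-- itertools.combinations(xs, k) in its documented order (size-k index-increasing
-- subsequences, lexicographic by position) — hand port of the library call, exact there
def pvCombinations (k : Nat) (xs : List String) : List (List String) :=
  match k, xs with
  | 0, _ => [[]]
  | _ + 1, [] => []
  | k + 1, x :: rest => (pvCombinations k rest).map (fun t => x :: t) ++ pvCombinations (k + 1) rest

def generate_flag_combinations_py (flags : List String) (min_size : Int) (max_size : Option Int) (exclude_conflicts : Bool) : List (List String) :=
  let maxSz : Int := max_size.getD (flags.length : Int)
  -- for size in range(min_size, max_size+1): for combo in combinations(flags, size): if not has_conflict: append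
  -- (s.toNat: Python raises ValueError on a negative size — those inputs are outside Pre_)
  (PySem.List.pyRange min_size (maxSz + 1) 1).foldl
    (fun acc s =>
      (pvCombinations s.toNat flags).foldl
        (fun acc2 c => if !pvHasConflict exclude_conflicts c then acc2 ++ [c] else acc2) acc)
    []

-- ===== PORT B =====
def pvGroups : List (List String) :=
  [["-O0", "-O1", "-O2", "-O3", "-Os", "-Oz", "-Ofast", "-Og"],
   ["-flto", "-flto=thin", "-flto=full"],
   ["-finline-functions", "-fno-inline", "-fno-inline-functions"],
   ["-finline-limit=1000", "-finline-limit=10000", "-finline-limit=999999"],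
   ["-fomit-frame-pointer", "-fno-omit-frame-pointer"],
   ["-funroll-loops", "-funroll-all-loops", "-fno-unroll-loops"],
   ["-fvectorize", "-fno-vectorize"],
   ["-fslp-vectorize", "-fno-slp-vectorize"],
   ["-ffp-contract=fast", "-ffp-contract=off"],
   ["-fcf-protection=none", "-fcf-protection=branch", "-fcf-protection=return", "-fcf-protection=full"],
   ["-mllvm -regalloc=greedy", "-mllvm -regalloc=basic", "-mllvm -regalloc=fast", "-mllvm -regalloc=pbqp"],
   ["-fmerge-constants", "-fmerge-all-constants", "-fno-merge-constants"],
   ["-fstrict-aliasing", "-fno-strict-aliasing"],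
   ["-foptimize-sibling-calls", "-fno-optimize-sibling-calls"]]

-- ok(f, grp, chosen): after adding f, its conflict group grp must still
-- contribute at most one distinct flag: len({x for x in chosen if x in grp} | {f}) <= 1
def pvOk (exclude_conflicts : Bool) (f : String) (grp : Option (List String)) (chosen : List String) : Bool :=
  if !exclude_conflicts then true
  else
    match grp with
    | none => true
    | some g =>
      decide ((PySem.Set.union (PySem.Set.ofList (chosen.filter (fun x => g.contains x))) [f]).length ≤ 1)

-- next((g for g in _CONFLICT_GROUPS if f in g), None): first group containing f
def pvFindGroup (f : String) : Option (List String) :=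
  pvGroups.find? (fun g => g.contains f)

-- dfs(i, chosen): recursive backtracking over the remaining flags
-- (python's items[i:]); the for-j loop is the structural recursion on rest,
-- `break` returns [], a take step emits chosen+[f] and explores deeper first
def pvDfs (exclude_conflicts : Bool) (lo hi : Int) : List (String × Option (List String)) → List String → List (List String)
  | rest, chosen =>
    if (chosen.length : Int) = hi then []
    else
      match rest with
      | [] => []
      | (f, grp) :: rs =>
        if ((rest.length : Int) < lo - (chosen.length : Int)) then []
        else
          (if pvOk exclude_conflicts f grp chosen then
              (chosen ++ [f]) :: pvDfs exclude_conflicts lo hi rs (chosen ++ [f])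
            else [])
            ++ pvDfs exclude_conflicts lo hi rs chosen

def generate_flag_combinations_py_alt (flags : List String) (min_size : Int) (max_size : Option Int) (exclude_conflicts : Bool) : List (List String) :=
  let n : Int := (flags.length : Int)
  let maxSz : Int := max_size.getD n
  let items : List (String × Option (List String)) := flags.map (fun f => (f, pvFindGroup f))
  let lo : Int := max min_size 0
  let hi : Int := min maxSz n
  -- Source B's mutable buckets are modeled by the emission order: buckets[k] is the
  -- emission-order sublist of the length-k combinations, i.e. filter (len == k);
  -- buckets[0] holds [] (appended before the dfs) when the size window is nonempty
  let emitted : List (List String) :=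
    if lo ≤ hi then ([] : List String) :: pvDfs exclude_conflicts lo hi items [] else []
  (PySem.List.pyRange lo (hi + 1) 1).foldl
    (fun acc k => acc ++ emitted.filter (fun c => (c.length : Int) == k)) []

-- ===== PRECONDITION & SPEC =====
-- Pre_ excludes exactly the inputs where A raises ValueError ("r must be non-negative"):
-- a negative min_size together with a nonempty size range makes itertools.combinations
-- receive a negative r; A returns on every other input.
def Pre_generate_flag_combinations_py (flags : List String) (min_size : Int) (max_size : Option Int) (exclude_conflicts : Bool) : Prop :=
  0 ≤ min_size ∨ max_size.getD (flags.length : Int) < min_size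
instance (flags : List String) (min_size : Int) (max_size : Option Int) (exclude_conflicts : Bool) : Decidable (Pre_generate_flag_combinations_py flags min_size max_size exclude_conflicts) := by unfold Pre_generate_flag_combinations_py; infer_instance

def pvWitness_generate_flag_combinations_py : List String × Int × Option Int × Bool := (["-O0", "-O1", "-x"], 1, none, true)

def Spec_generate_flag_combinations_py (flags : List String) (min_size : Int) (max_size : Option Int) (exclude_conflicts : Bool) (out : List (List String)) : Prop := out = generate_flag_combinations_py_alt flags min_size max_size exclude_conflicts
instance (flags : List String) (min_size : Int) (max_size : Option Int) (exclude_conflicts : Bool) (out : List (List String)) : Decidable (Spec_generate_flag_combinations_py flags min_size max_size exclude_conflicts out) := by unfold Spec_generate_flag_combinations_py; infer_instance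

-- ===== CLAIM (what is proved, stated in full; the proofs are below) =====
def Claim_equal_generate_flag_combinations_py : Prop := ∀ (flags : List String) (min_size : Int) (max_size : Option Int) (exclude_conflicts : Bool), Dom_generate_flag_combinations_py flags min_size max_size exclude_conflicts → Pre_generate_flag_combinations_py flags min_size max_size exclude_conflicts → Spec_generate_flag_combinations_py flags min_size max_size exclude_conflicts (generate_flag_combinations_py flags min_size max_size exclude_conflicts)

-- ===== LEMMAS AND PROOFS =====

-- the two literal conflict tables hold the same (already duplicate-free) groups
lemma pvConflicts_eq : pvConflicts = pvGroups := by decide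

lemma one_lt_length_iff {α : Type} (l : List α) (h : l.Nodup) :
    1 < l.length ↔ ∃ x ∈ l, ∃ y ∈ l, x ≠ y := by
  constructor
  · intro hl
    match l, hl with
    | a :: b :: t, _ =>
      exact ⟨a, by simp, b, by simp, by simp at h; tauto⟩
  · rintro ⟨x, hx, y, hy, hxy⟩
    match l with
    | [] => simp at hx
    | [a] => simp at hx hy; subst hx; subst hy; exact absurd rfl hxy
    | a :: b :: t => simp

-- characterization of A's conflict test: some group holds two distinct members of the combo
lemma pvHasConflict_iff (ec : Bool) (c : List String) :
    pvHasConflict ec c = true ↔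
      ec = true ∧ ∃ g ∈ pvGroups, ∃ x ∈ g, ∃ y ∈ g, x ∈ c ∧ y ∈ c ∧ x ≠ y := by
  cases ec with
  | false => simp [pvHasConflict]
  | true =>
    simp only [pvHasConflict, Bool.not_true, Bool.false_eq_true, if_false, List.any_eq_true, true_and]
    rw [← pvConflicts_eq]
    constructor
    · rintro ⟨g, hg, hlen⟩
      have hnd : (PySem.Set.inter (PySem.Set.ofList c) g).Nodup :=
        PySem.Set.nodup_inter _ _ (PySem.Set.nodup_ofList _)
      rw [decide_eq_true_iff, one_lt_length_iff _ hnd] at hlen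
      obtain ⟨x, hx, y, hy, hxy⟩ := hlen
      rw [PySem.Set.mem_inter, PySem.Set.mem_ofList] at hx hy
      exact ⟨g, hg, x, hx.2, y, hy.2, hx.1, hy.1, hxy⟩
    · rintro ⟨g, hg, x, hxg, y, hyg, hxc, hyc, hxy⟩
      refine ⟨g, hg, ?_⟩
      have hnd : (PySem.Set.inter (PySem.Set.ofList c) g).Nodup :=
        PySem.Set.nodup_inter _ _ (PySem.Set.nodup_ofList _)
      rw [decide_eq_true_iff, one_lt_length_iff _ hnd]
      exact ⟨x, by rw [PySem.Set.mem_inter, PySem.Set.mem_ofList]; exact ⟨hxc, hxg⟩,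
             y, by rw [PySem.Set.mem_inter, PySem.Set.mem_ofList]; exact ⟨hyc, hyg⟩, hxy⟩

lemma pvHasConflict_nil (ec : Bool) : pvHasConflict ec [] = false := by
  cases ec <;> decide

-- characterization of B's pruning test: pvOk is true iff no chosen flag other
-- than f lies in f's conflict group
lemma pvOk_iff (f : String) (g : List String) (chosen : List String) :
    pvOk true f (some g) chosen = true ↔ ∀ x ∈ chosen, x ∈ g → x = f := by
  simp only [pvOk, Bool.not_true, Bool.false_eq_true, if_false, decide_eq_true_iff]
  set S : PySem.Set String := PySem.Set.ofList (chosen.filter (fun x => g.contains x)) with hS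
  have hmemS : ∀ x, x ∈ S ↔ x ∈ chosen ∧ x ∈ g := by
    intro x
    rw [hS, PySem.Set.mem_ofList, List.mem_filter]
    simp
  have hndU : (PySem.Set.union S ["" ++ f]).Nodup := by
    exact PySem.Set.nodup_union _ _ (PySem.Set.nodup_ofList _)
  have hndU' : (PySem.Set.union S [f]).Nodup := by simpa using hndU
  have hmemU : ∀ x, x ∈ PySem.Set.union S [f] ↔ x ∈ S ∨ x = f := by
    intro x
    rw [PySem.Set.mem_union]
    simp
  have hfU : f ∈ PySem.Set.union S [f] := (hmemU f).2 (Or.inr rfl)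
  constructor
  · intro hlen x hxc hxg
    by_contra hne
    have h2 : 1 < (PySem.Set.union S [f]).length := by
      rw [one_lt_length_iff _ hndU']
      exact ⟨x, (hmemU x).2 (Or.inl ((hmemS x).2 ⟨hxc, hxg⟩)), f, hfU, hne⟩
    omega
  · intro hall
    by_contra hlen
    have h2 : 1 < (PySem.Set.union S [f]).length := by omega
    rw [one_lt_length_iff _ hndU'] at h2
    obtain ⟨x, hx, y, hy, hxy⟩ := h2
    rw [hmemU] at hx hy
    have hex : ∀ z, z ∈ S ∨ z = f → z = f := by
      intro z hz
      rcases hz with hz | hz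
      · obtain ⟨hzc, hzg⟩ := (hmemS z).1 hz
        exact hall z hzc hzg
      · exact hz
    exact hxy ((hex x hx).trans (hex y hy).symm)

-- pruning is sound: a rejected flag makes every extension conflict
lemma pvGroups_disjoint_bool :
    List.Pairwise (fun g1 g2 => g1.all (fun x => !(g2.contains x)) = true) pvGroups := by
  decide

lemma pvGroups_unique (g1 g2 : List String) (f : String) (h1 : g1 ∈ pvGroups)
    (h2 : g2 ∈ pvGroups) (hf1 : f ∈ g1) (hf2 : f ∈ g2) : g1 = g2 := by
  by_contra hne
  have hp : List.Pairwise (fun a b : List String => ∀ x, ¬(x ∈ a ∧ x ∈ b)) pvGroups := by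
    refine pvGroups_disjoint_bool.imp ?_
    intro a b hab x hx
    have h3 := List.all_eq_true.mp hab x hx.1
    simp only [Bool.not_eq_true', ← Bool.not_eq_true, List.contains_iff_mem] at h3
    exact absurd hx.2 (by simpa using h3)
  have hsym : Symmetric (fun a b : List String => ∀ x, ¬(x ∈ a ∧ x ∈ b)) := by
    intro a b h x hx
    exact h x ⟨hx.2, hx.1⟩
  exact (hp.forall hsym h1 h2 hne) f ⟨hf1, hf2⟩

lemma pvFindGroup_some {f : String} {g : List String} (h : pvFindGroup f = some g) :
    g ∈ pvGroups ∧ f ∈ g :=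
  ⟨List.mem_of_find?_eq_some h, by simpa [List.contains_iff_mem] using List.find?_some h⟩

lemma pvFindGroup_of_mem {f : String} {g : List String} (hg : g ∈ pvGroups) (hf : f ∈ g) :
    pvFindGroup f = some g := by
  cases hfind : pvFindGroup f with
  | none =>
    exact absurd (List.find?_eq_none.mp hfind g hg) (by simp [hf])
  | some g' =>
    obtain ⟨hg', hf'⟩ := pvFindGroup_some hfind
    rw [pvGroups_unique g g' f hg hg' hf hf']

-- pruning is sound: a rejected flag makes every extension conflict
lemma pvOk_false_conflict (ec : Bool) (f : String) (chosen t : List String)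
    (h : pvOk ec f (pvFindGroup f) chosen = false) :
    pvHasConflict ec (chosen ++ f :: t) = true := by
  cases ec with
  | false => exact Bool.noConfusion ((rfl : pvOk false f (pvFindGroup f) chosen = true).symm.trans h)
  | true =>
    cases hfind : pvFindGroup f with
    | none =>
      rw [hfind] at h
      exact Bool.noConfusion ((rfl : pvOk true f none chosen = true).symm.trans h)
    | some g =>
      rw [hfind] at h
      obtain ⟨hg, hfg⟩ := pvFindGroup_some hfind
      have h2 : ¬ ∀ x ∈ chosen, x ∈ g → x = f := by
        intro hall
        rw [(pvOk_iff f g chosen).2 hall] at h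
        exact Bool.noConfusion h
      push_neg at h2
      obtain ⟨x, hxc, hxg, hne⟩ := h2
      rw [pvHasConflict_iff]
      exact ⟨rfl, g, hg, x, hxg, f, hfg, by simp [hxc], by simp, hne⟩

-- pruning is complete: an accepted flag keeps the partial combination conflict-free
lemma pvOk_true_preserve (ec : Bool) (f : String) (chosen : List String)
    (hok : pvOk ec f (pvFindGroup f) chosen = true) (h : pvHasConflict ec chosen = false) :
    pvHasConflict ec (chosen ++ [f]) = false := by
  cases ec with
  | false => exact (rfl : pvHasConflict false (chosen ++ [f]) = false)
  | true =>
    by_contra hc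
    rw [Bool.not_eq_false, pvHasConflict_iff] at hc
    obtain ⟨-, g, hg, x, hxg, y, hyg, hxc, hyc, hxy⟩ := hc
    simp only [List.mem_append, List.mem_singleton] at hxc hyc
    have hclash : ∀ z ∈ chosen, z ≠ f → f ∈ g → z ∈ g → False := by
      intro z hz hzf hfg hzg
      have hfind : pvFindGroup f = some g := pvFindGroup_of_mem hg hfg
      rw [hfind] at hok
      exact hzf ((pvOk_iff f g chosen).1 hok z hz hzg)
    have hno : ¬ (∃ g ∈ pvGroups, ∃ x ∈ g, ∃ y ∈ g, x ∈ chosen ∧ y ∈ chosen ∧ x ≠ y) := by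
      intro hcon
      have ht : pvHasConflict true chosen = true := (pvHasConflict_iff true chosen).2 ⟨rfl, hcon⟩
      rw [h] at ht
      exact Bool.noConfusion ht
    rcases hxc with hxc | hxc <;> rcases hyc with hyc | hyc
    · exact hno ⟨g, hg, x, hxg, y, hyg, hxc, hyc, hxy⟩
    · subst hyc; exact hclash x hxc hxy hyg hxg
    · subst hxc; exact hclash y hyc (Ne.symm hxy) hxg hyg
    · exact hxy (hxc.trans hyc.symm)

-- every combination the dfs emits strictly extends `chosen`
lemma pvDfs_longer (ec : Bool) (lo hi : Int) (rest : List (String × Option (List String))) :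
    ∀ (chosen c : List String), c ∈ pvDfs ec lo hi rest chosen → chosen.length < c.length := by
  induction rest with
  | nil =>
    intro chosen c hc
    rw [pvDfs] at hc
    split at hc
    · exact absurd hc (List.not_mem_nil)
    · exact absurd hc (List.not_mem_nil)
  | cons p rs ih =>
    intro chosen c hc
    obtain ⟨f, grp⟩ := p
    rw [pvDfs] at hc
    split at hc
    · exact absurd hc (List.not_mem_nil)
    · split at hc
      · exact absurd hc (List.not_mem_nil)
      · rcases List.mem_append.mp hc with hc | hc
        · split at hc
          · rcases List.mem_cons.mp hc with rfl | hc
            · simp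
            · have := ih (chosen ++ [f]) c hc
              simp at this
              omega
          · exact absurd hc (List.not_mem_nil)
        · exact ih chosen c hc

lemma pvCombinations_eq_nil (k : Nat) (xs : List String) (h : xs.length < k) :
    pvCombinations k xs = [] := by
  induction xs generalizing k with
  | nil => match k, h with | _ + 1, _ => rfl
  | cons x rest ih =>
    match k, h with
    | k + 1, h =>
      simp only [pvCombinations]
      rw [ih k (by simpa using h), ih (k + 1) (by simp at h ⊢; omega)]
      rfl

-- the dfs emissions of each length are exactly the filtered combinations extending `chosen`
lemma pvDfs_filter (ec : Bool) (lo hi : Int) (xs : List String) :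
    ∀ (chosen : List String) (j : Nat), 1 ≤ j → lo ≤ ((chosen.length + j : Nat) : Int) →
    ((chosen.length + j : Nat) : Int) ≤ hi →
    pvHasConflict ec chosen = false →
    (pvDfs ec lo hi (xs.map (fun f => (f, pvFindGroup f))) chosen).filter
        (fun c => c.length == chosen.length + j)
      = ((pvCombinations j xs).map (fun t => chosen ++ t)).filter
          (fun c => !pvHasConflict ec c) := by
  induction xs with
  | nil =>
    intro chosen j hj hlo hhi h
    match j, hj with
    | j + 1, _ =>
      rw [List.map_nil, pvDfs, if_neg (by push_cast at hhi ⊢; omega)]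
      simp [pvCombinations]
  | cons f xs' ih =>
    intro chosen j hj hlo hhi h
    match j, hj with
    | j + 1, _ =>
      rw [List.map_cons, pvDfs, if_neg (by push_cast at hhi ⊢; omega)]
      by_cases hbr : ((((f, pvFindGroup f) :: xs'.map (fun f => (f, pvFindGroup f))).length : Int)
          < lo - (chosen.length : Int))
      · -- break: too few flags left even to reach size lo ≤ chosen.length + (j+1)
        rw [if_pos hbr]
        rw [pvCombinations_eq_nil (j + 1) (f :: xs') (by
          simp only [List.length_cons, List.length_map] at hbr ⊢
          push_cast at hbr hlo
          omega)]
        simp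
      · rw [if_neg hbr]
        rw [List.filter_append]
        simp only [pvCombinations, List.map_append, List.filter_append, List.map_map]
        have hskip := ih chosen (j + 1) (by omega) hlo hhi h
        rw [hskip]
        congr 1
        by_cases hok : pvOk ec f (pvFindGroup f) chosen = true
        · rw [if_pos hok]
          have hconf2 : pvHasConflict ec (chosen ++ [f]) = false :=
            pvOk_true_preserve ec f chosen hok h
          match j with
          | 0 =>
            -- target length is chosen.length + 1: the take emission survives, deeper ones do not
            rw [List.filter_cons]
            rw [if_pos (by simp)]
            have hdeep : (pvDfs ec lo hi ((xs').map (fun f => (f, pvFindGroup f))) (chosen ++ [f])).filter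
                (fun c => c.length == chosen.length + 1) = [] := by
              rw [List.filter_eq_nil_iff]
              intro c hc
              have := pvDfs_longer ec lo hi _ _ c hc
              simp at this ⊢
              omega
            rw [hdeep]
            simp [pvCombinations, hconf2]
          | j + 1 =>
            -- target length is deeper: the take emission is filtered out
            rw [List.filter_cons]
            rw [if_neg (by simp)]
            have htake := ih (chosen ++ [f]) (j + 1) (by omega)
              (by simp at hlo ⊢; omega) (by simp at hhi ⊢; omega) hconf2
            have hlen : ∀ c : List String,
                (c.length == (chosen ++ [f]).length + (j + 1)) = (c.length == chosen.length + (j + 2)) := by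
              intro c; simp; omega
            rw [List.filter_congr (fun c _ => hlen c)] at htake
            rw [htake]
            congr 1
            simp [Function.comp]
        · rw [if_neg hok, List.filter_nil, eq_comm, List.filter_eq_nil_iff]
          intro c hc
          simp only [List.mem_map, Function.comp] at hc
          obtain ⟨t, ht, rfl⟩ := hc
          simp [pvOk_false_conflict ec f chosen t (Bool.eq_false_iff.mpr hok)]

theorem main_eq (flags : List String) (min_size : Int) (max_size : Option Int) (ec : Bool)
    (hpre : Pre_generate_flag_combinations_py flags min_size max_size ec) :
    generate_flag_combinations_py flags min_size max_size ec
      = generate_flag_combinations_py_alt flags min_size max_size ec := by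
  unfold generate_flag_combinations_py generate_flag_combinations_py_alt
  dsimp only
  set maxSz : Int := max_size.getD (flags.length : Int) with hmaxSz
  set n : Int := (flags.length : Int) with hn
  set lo : Int := max min_size 0 with hlo
  set hi : Int := min maxSz n with hhi
  -- A's inner append-if loop is a filter
  have hA : (PySem.List.pyRange min_size (maxSz + 1) 1).foldl
      (fun acc s =>
        (pvCombinations s.toNat flags).foldl
          (fun acc2 c => if !pvHasConflict ec c then acc2 ++ [c] else acc2) acc) []
      = (PySem.List.pyRange min_size (maxSz + 1) 1).foldl
          (fun acc s =>
            acc ++ (pvCombinations s.toNat flags).filter (fun c => !pvHasConflict ec c)) [] :=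
    PySem.List.foldl_congr_mem' _ _ _ _ (fun s _ acc => PySem.List.foldl_append_if_eq_filter _ _ acc)
  rw [hA]
  rw [PySem.List.foldl_append_eq_flatMap, PySem.List.foldl_append_eq_flatMap, List.nil_append,
    List.nil_append]
  by_cases hr : maxSz + 1 ≤ min_size
  · -- empty size range on both sides
    have hA : PySem.List.pyRange min_size (maxSz + 1) 1 = [] := by
      rw [PySem.List.pyRange_one, show (maxSz + 1 - min_size).toNat = 0 by omega]
      simp
    have hB : PySem.List.pyRange lo (hi + 1) 1 = [] := by
      rw [PySem.List.pyRange_one, show (hi + 1 - lo).toNat = 0 by omega]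
      simp
    rw [hA, hB]
    simp
  · have hmin : 0 ≤ min_size := by
      unfold Pre_generate_flag_combinations_py at hpre
      rw [← hmaxSz] at hpre
      rcases hpre with h | h
      · exact h
      · omega
    have hlo' : lo = min_size := by omega
    -- the sizes above hi contribute nothing on A's side
    have hnil : ∀ k : Int, hi < k → k ≤ maxSz →
        (pvCombinations k.toNat flags).filter (fun c => !pvHasConflict ec c) = [] := by
      intro k hk hkmax
      rw [pvCombinations_eq_nil _ _ (by omega)]
      rfl
    by_cases hempty : hi < lo
    · -- B's range is empty and all of A's sizes exceed hi
      have hB : PySem.List.pyRange lo (hi + 1) 1 = [] := by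
        rw [PySem.List.pyRange_one, show (hi + 1 - lo).toNat = 0 by omega]
        simp
      rw [hB, List.flatMap_nil, List.flatMap_eq_nil_iff]
      intro k hk
      have hk' := PySem.List.mem_pyRange_one.mp hk
      exact hnil k (by omega) (by omega)
    · -- split A's range at hi + 1; the tail vanishes
      rw [PySem.List.pyRange_one_append min_size (hi + 1) (maxSz + 1) (by omega) (by omega),
        List.flatMap_append]
      have htail : (PySem.List.pyRange (hi + 1) (maxSz + 1) 1).flatMap
          (fun s => (pvCombinations s.toNat flags).filter (fun c => !pvHasConflict ec c)) = [] := by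
        rw [List.flatMap_eq_nil_iff]
        intro k hk
        have hk' := PySem.List.mem_pyRange_one.mp hk
        exact hnil k (by omega) (by omega)
      rw [htail, List.append_nil, ← hlo']
      -- pointwise: bucket k = filtered combinations of size k
      rw [if_pos (show lo ≤ hi by omega)]
      apply List.flatMap_congr
      intro k hk
      have hk' := PySem.List.mem_pyRange_one.mp hk
      have hk0 : 0 ≤ k := by omega
      by_cases hkz : k = 0
      · subst hkz
        rw [List.filter_cons]
        rw [if_pos (by simp)]
        have hdeep : (pvDfs ec lo hi (flags.map (fun f => (f, pvFindGroup f))) []).filter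
            (fun c => (c.length : Int) == 0) = [] := by
          rw [List.filter_eq_nil_iff]
          intro c hc
          have h1 := pvDfs_longer ec lo hi _ _ c hc
          simp only [List.length_nil] at h1
          simp only [beq_iff_eq]
          omega
        rw [hdeep]
        rw [show pvCombinations (0 : Int).toNat flags = [[]] from by cases flags <;> rfl]
        simp [pvHasConflict_nil]
      · -- k ≥ 1: the [] bucket entry is filtered out, then pvDfs_filter applies
        rw [List.filter_cons]
        rw [if_neg (by simp; omega)]
        have hcast : ∀ c : List String, ((c.length : Int) == k) = (c.length == (0 : Nat) + k.toNat) := by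
          intro c
          rw [Bool.eq_iff_iff]
          simp only [beq_iff_eq, Nat.zero_add]
          omega
        rw [List.filter_congr (fun c _ => hcast c)]
        have hfl := pvDfs_filter ec lo hi flags [] k.toNat (by omega)
          (by simp only [List.length_nil, Nat.zero_add]; omega)
          (by simp only [List.length_nil, Nat.zero_add]; omega) (pvHasConflict_nil ec)
        simp only [List.length_nil] at hfl
        rw [hfl]
        simp

-- ===== VERDICT (by name: the statement is the Claim_ definition above) =====
theorem generate_flag_combinations_py_spec : Claim_equal_generate_flag_combinations_py := by
  intro flags min_size max_size ec _ hpre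
  exact main_eq flags min_size max_size ec hpre
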